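-- pv_equiv track=rewrite | github.com/odpi/egeria-python | md_processing/md_processing_utils/determine_width.py | is_alignment_row
-- ===== SOURCE A (Python) =====
-- def split_row(line: str) -> list[str]:
--     s = line.strip()
--     if s.startswith("|"):
--         s = s[1:]
--     if s.endswith("|"):
--         s = s[:-1]
--
--     parts = []
--     cur = []
--     escape = False
--     for ch in s:
--         if escape:
--             cur.append(ch)
--             escape = False
--         elif ch == "\\":
--             escape = True
--         elif ch == "|":
--             parts.append("".join(cur))
--             cur = []
--         else:
--             cur.append(ch)
--     parts.append("".join(cur))
--     return parts
--
-- def is_alignment_row(line: str) -> bool: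
--     parts = split_row(line)
--     if not parts:
--         return False
--     def is_align_cell(c: str) -> bool:
--         c = c.strip()
--         return c != "" and all(ch in ":-" for ch in c)
--     return all(is_align_cell(p) for p in parts)
-- ===== SOURCE B (Python) =====
-- def is_alignment_row(line: str) -> bool:
--     s = line.strip()
--     if s.startswith("|"):
--         s = s[1:]
--     if s.endswith("|"):
--         s = s[:-1]
--     # one streaming pass; per-cell state: 0 = only whitespace seen,
--     # 1 = in ':-' content, 2 = whitespace after content
--     state = 0
--     escape = False
--     for ch in s:
--         if not escape and ch == "\\":
--             escape = True
--             continue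
--         if not escape and ch == "|":
--             if state == 0:
--                 return False
--             state = 0
--         elif ch in ":-":
--             if state == 2:
--                 return False
--             state = 1
--         elif ch.isspace():
--             if state == 1:
--                 state = 2
--         else:
--             return False
--         escape = False
--     return state != 0
-- ===== Notes on version B (the rewrite author's own statement) =====
-- stated objective: alternative
-- what changed: B fuses split_row and the per-cell validation into one streaming pass that keeps only a 3-valued per-cell state (leading-ws / ':-' content / trailing-ws) with early exit, never building the cell list or any cell string.
import Mathlib
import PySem

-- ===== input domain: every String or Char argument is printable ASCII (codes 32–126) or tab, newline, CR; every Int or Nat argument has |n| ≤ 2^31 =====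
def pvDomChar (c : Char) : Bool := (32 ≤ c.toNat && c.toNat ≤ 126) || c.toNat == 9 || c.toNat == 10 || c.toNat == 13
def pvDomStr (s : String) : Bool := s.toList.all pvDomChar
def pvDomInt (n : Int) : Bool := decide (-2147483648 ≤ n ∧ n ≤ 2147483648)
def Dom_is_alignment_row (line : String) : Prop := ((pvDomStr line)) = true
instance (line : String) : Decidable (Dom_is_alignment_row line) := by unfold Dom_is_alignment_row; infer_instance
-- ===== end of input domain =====

-- B replaces split_row + per-cell validation by a single streaming pass that keeps only a
-- 3-valued per-cell state (no cell list, no per-cell strings) with early exit: objective 'alternative'.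

-- ===== PORT A =====
-- the escape-aware cell splitter of split_row: state (parts, cur, escape)
def pvSplitLoop : List Char → List (List Char) → List Char → Bool → List (List Char)
  | [], parts, cur, _ => parts ++ [cur]
  | ch :: rest, parts, cur, escape =>
    if escape then pvSplitLoop rest parts (cur ++ [ch]) false
    else if ch = '\\' then pvSplitLoop rest parts cur true
    else if ch = '|' then pvSplitLoop rest (parts ++ [cur]) [] false
    else pvSplitLoop rest parts (cur ++ [ch]) false

def pvSplitRow (line : String) : List (List Char) :=
  let s := PySem.Chars.strip line.toList
  let s := if PySem.Chars.startswith s ['|'] then PySem.List.slice s (some 1) none else s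
  let s := if PySem.Chars.endswith s ['|'] then PySem.List.slice s none (some (-1)) else s
  pvSplitLoop s [] [] false

-- is_align_cell; `ch in ":-"` for a single char is exactly ch = ':' ∨ ch = '-'
def pvIsAlignCell (c : List Char) : Bool :=
  let c' := PySem.Chars.strip c
  !c'.isEmpty && c'.all (fun ch => ch = ':' || ch = '-')

def is_alignment_row (line : String) : Bool :=
  let parts := pvSplitRow line
  if parts.isEmpty then false else parts.all pvIsAlignCell

-- ===== PORT B =====
-- one pass; state: 0 = only whitespace seen in this cell, 1 = in ':-' content, 2 = whitespace after content
def pvAltLoop : List Char → Nat → Bool → Bool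
  | [], state, _ => state != 0
  | ch :: rest, state, escape =>
    if !escape && ch = '\\' then pvAltLoop rest state true
    else if !escape && ch = '|' then
      (if state = 0 then false else pvAltLoop rest 0 false)
    else if ch = ':' || ch = '-' then
      (if state = 2 then false else pvAltLoop rest 1 false)
    else if PySem.Chars.isspace ch then
      pvAltLoop rest (if state = 1 then 2 else state) false
    else false

def is_alignment_row_alt (line : String) : Bool :=
  let s := PySem.Chars.strip line.toList
  let s := if PySem.Chars.startswith s ['|'] then PySem.List.slice s (some 1) none else s
  let s := if PySem.Chars.endswith s ['|'] then PySem.List.slice s none (some (-1)) else s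
  pvAltLoop s 0 false

-- ===== PRECONDITION & SPEC =====
def Spec_is_alignment_row (line : String) (out : Bool) : Prop := out = is_alignment_row_alt line
instance (line : String) (out : Bool) : Decidable (Spec_is_alignment_row line out) := by unfold Spec_is_alignment_row; infer_instance

-- ===== CLAIM (what is proved, stated in full; the proofs are below) =====
def Claim_equal_is_alignment_row : Prop := ∀ (line : String), Dom_is_alignment_row line → Spec_is_alignment_row line (is_alignment_row line)

-- ===== LEMMAS AND PROOFS =====

-- abstract per-cell state machine: what B's state would be after reading a raw cell content
def pvCellStep : Option Nat → Char → Option Nat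
  | none, _ => none
  | some st, ch =>
    if ch = ':' || ch = '-' then (if st = 2 then none else some 1)
    else if PySem.Chars.isspace ch then some (if st = 1 then 2 else st)
    else none

def pvStOf (c : List Char) : Option Nat := c.foldl pvCellStep (some 0)

def pvAccept : Option Nat → Bool
  | none => false
  | some st => st != 0

-- A's loop with the tail of the input, phrased so only the remaining input varies
def pvTailRun : List Char → List Char → Bool → Bool
  | [], cur, _ => pvIsAlignCell cur
  | ch :: rest, cur, escape =>
    if escape then pvTailRun rest (cur ++ [ch]) false
    else if ch = '\\' then pvTailRun rest cur true
    else if ch = '|' then (if pvIsAlignCell cur then pvTailRun rest [] false else false)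
    else pvTailRun rest (cur ++ [ch]) false

theorem pvFoldNone (c : List Char) : c.foldl pvCellStep none = none := by
  induction c with
  | nil => rfl
  | cons ch r ih => simpa [pvCellStep] using ih

theorem pvAlignNotSpace (ch : Char) (h : (ch = ':' || ch = '-') = true) :
    PySem.Chars.isspace ch = false := by
  rcases Bool.or_eq_true_iff.mp h with h | h <;> simp at h <;> subst h <;> decide

theorem pvF2 (c : List Char) :
    c.foldl pvCellStep (some 2) = if c.all PySem.Chars.isspace then some 2 else none := by
  induction c with
  | nil => rfl
  | cons ch r ih =>
    by_cases hp : (ch = ':' || ch = '-') = true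
    · have hws := pvAlignNotSpace ch hp
      simp [pvCellStep, hp, hws, pvFoldNone]
    · by_cases hws : PySem.Chars.isspace ch = true
      · simp [pvCellStep, hp, hws, ih]
      · simp [pvCellStep, hp, hws, pvFoldNone]

theorem pvF1 (c : List Char) :
    c.foldl pvCellStep (some 1) =
      if (c.dropWhile (fun ch => ch = ':' || ch = '-')).isEmpty then some 1
      else if (c.dropWhile (fun ch => ch = ':' || ch = '-')).all PySem.Chars.isspace then some 2
      else none := by
  induction c with
  | nil => rfl
  | cons ch r ih =>
    by_cases hp : (ch = ':' || ch = '-') = true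
    · simp [pvCellStep, hp, ih]
    · by_cases hws : PySem.Chars.isspace ch = true
      · simp [pvCellStep, hp, hws, pvF2 r]
      · simp [pvCellStep, hp, hws, pvFoldNone]

theorem pvF0 (c : List Char) :
    c.foldl pvCellStep (some 0) =
      match c.dropWhile PySem.Chars.isspace with
      | [] => some 0
      | ch :: r => if ch = ':' || ch = '-' then r.foldl pvCellStep (some 1) else none := by
  induction c with
  | nil => rfl
  | cons ch r ih =>
    by_cases hp : (ch = ':' || ch = '-') = true
    · have hws := pvAlignNotSpace ch hp
      simp [pvCellStep, hp, hws]
    · by_cases hws : PySem.Chars.isspace ch = true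
      · simpa [pvCellStep, hp, hws] using ih
      · simp [pvCellStep, hp, hws, pvFoldNone]

theorem pvRstripEmptyIff (v : List Char) :
    (PySem.Chars.rstrip v).isEmpty = v.all PySem.Chars.isspace := by
  rw [Bool.eq_iff_iff]
  simp [PySem.Chars.rstrip, List.isEmpty_iff, List.dropWhile_eq_nil_iff, List.all_eq_true,
    List.mem_reverse]

theorem pvRstripCons (ch : Char) (v : List Char) :
    PySem.Chars.rstrip (ch :: v) =
      if PySem.Chars.isspace ch && (PySem.Chars.rstrip v).isEmpty then []
      else ch :: PySem.Chars.rstrip v := by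
  show (List.dropWhile PySem.Chars.isspace (ch :: v).reverse).reverse = _
  rw [List.reverse_cons, List.dropWhile_append]
  by_cases he : List.dropWhile PySem.Chars.isspace v.reverse = []
  · have hre : (PySem.Chars.rstrip v).isEmpty = true := by
      simp [PySem.Chars.rstrip, he]
    by_cases hws : PySem.Chars.isspace ch = true
    · simp [he, hws, hre, List.dropWhile]
    · simp [he, hws, List.dropWhile, PySem.Chars.rstrip]
  · have hre : (PySem.Chars.rstrip v).isEmpty = false := by
      simp [PySem.Chars.rstrip, he]
    simp [he, PySem.Chars.rstrip, List.reverse_append]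

-- "strip then all in ':-'" read off from the ':-'-prefix of the raw cell
theorem pvH (u : List Char) :
    (PySem.Chars.rstrip u).all (fun ch => ch = ':' || ch = '-')
      = (u.dropWhile (fun ch => ch = ':' || ch = '-')).all PySem.Chars.isspace := by
  induction u with
  | nil => rfl
  | cons ch v ih =>
    rw [pvRstripCons]
    by_cases hp : (ch = ':' || ch = '-') = true
    · have hws := pvAlignNotSpace ch hp
      simp [hws, hp, ih]
    · by_cases hws : PySem.Chars.isspace ch = true
      · by_cases he : (PySem.Chars.rstrip v).isEmpty = true
        · rw [pvRstripEmptyIff] at he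
          simp [hws, pvRstripEmptyIff, hp, he]
        · rw [pvRstripEmptyIff] at he
          simp only [Bool.not_eq_true] at he
          simp [hws, pvRstripEmptyIff, hp, he]
      · simp [hws, hp]

theorem pvS1 (c : List Char) : pvIsAlignCell c = pvAccept (pvStOf c) := by
  unfold pvStOf
  rw [pvF0]
  unfold pvIsAlignCell
  show (!(PySem.Chars.rstrip (List.dropWhile PySem.Chars.isspace c)).isEmpty
        && (PySem.Chars.rstrip (List.dropWhile PySem.Chars.isspace c)).all _) = _
  cases hd : List.dropWhile PySem.Chars.isspace c with
  | nil => simp [PySem.Chars.rstrip, pvAccept]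
  | cons ch r =>
    have hws : PySem.Chars.isspace ch = false := by
      have := List.head?_dropWhile_not PySem.Chars.isspace c
      rw [hd] at this; simpa using this
    rw [pvRstripCons, hws]
    have hH := pvH r
    by_cases hp : (ch = ':' || ch = '-') = true
    · by_cases he : (r.dropWhile (fun ch => ch = ':' || ch = '-')) = []
      · simp [hp, pvF1, pvAccept, hH, he]
      · by_cases ha : (r.dropWhile (fun ch => ch = ':' || ch = '-')).all PySem.Chars.isspace = true
        · simp [hp, pvF1, pvAccept, hH, he, ha]
        · simp [hp, pvF1, pvAccept, hH, he, ha]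
    · simp [hp, pvAccept]

theorem pvStOfSnoc (cur : List Char) (ch : Char) :
    pvStOf (cur ++ [ch]) = pvCellStep (pvStOf cur) ch := by
  simp [pvStOf, List.foldl_append]

-- A's tail loop equals B's loop run from the abstract state of the current cell
theorem pvL2 (s : List Char) : ∀ (cur : List Char) (escape : Bool),
    pvTailRun s cur escape =
      match pvStOf cur with
      | none => false
      | some st => pvAltLoop s st escape := by
  induction s with
  | nil =>
    intro cur escape
    rw [show pvTailRun [] cur escape = pvIsAlignCell cur from rfl, pvS1]
    cases h : pvStOf cur <;> simp [pvAccept, pvAltLoop]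
  | cons ch rest ih =>
    intro cur escape
    cases escape with
    | true =>
      rw [show pvTailRun (ch :: rest) cur true = pvTailRun rest (cur ++ [ch]) false from rfl,
          ih, pvStOfSnoc]
      cases h : pvStOf cur with
      | none => simp [pvCellStep]
      | some st =>
        by_cases hp : (ch = ':' || ch = '-') = true
        · have hws := pvAlignNotSpace ch hp
          by_cases h2 : st = 2 <;> simp [pvCellStep, pvAltLoop, hp, h2]
        · by_cases hws : PySem.Chars.isspace ch = true
          · simp [pvCellStep, pvAltLoop, hp, hws]
          · simp [pvCellStep, pvAltLoop, hp, hws]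
    | false =>
      by_cases hb : ch = '\\'
      · rw [show pvTailRun (ch :: rest) cur false = pvTailRun rest cur true by simp [pvTailRun, hb], ih]
        cases h : pvStOf cur <;> simp [pvAltLoop, hb]
      · by_cases hpipe : ch = '|'
        · rw [show pvTailRun (ch :: rest) cur false
              = (if pvIsAlignCell cur then pvTailRun rest [] false else false) by
                simp [pvTailRun, hpipe], ih, pvS1]
          have h0 : pvStOf ([] : List Char) = some 0 := rfl
          cases h : pvStOf cur with
          | none => simp [pvAccept]
          | some st =>
            by_cases h0' : st = 0 <;> simp [pvAccept, pvAltLoop, hpipe, h0', h0]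
        · rw [show pvTailRun (ch :: rest) cur false = pvTailRun rest (cur ++ [ch]) false by
              simp [pvTailRun, hb, hpipe], ih, pvStOfSnoc]
          cases h : pvStOf cur with
          | none => simp [pvCellStep]
          | some st =>
            by_cases hp : (ch = ':' || ch = '-') = true
            · have hws := pvAlignNotSpace ch hp
              by_cases h2 : st = 2 <;> simp [pvCellStep, pvAltLoop, hb, hpipe, hp, h2]
            · by_cases hws : PySem.Chars.isspace ch = true
              · simp [pvCellStep, pvAltLoop, hb, hpipe, hp, hws]
              · simp [pvCellStep, pvAltLoop, hb, hpipe, hp, hws]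

theorem pvSplitLoopNeNil (s : List Char) : ∀ parts cur escape,
    pvSplitLoop s parts cur escape ≠ [] := by
  induction s with
  | nil => intro parts cur escape; simp [pvSplitLoop]
  | cons ch rest ih =>
    intro parts cur escape
    by_cases he : escape = true
    · subst he; exact ih _ _ _
    · simp only [Bool.not_eq_true] at he; subst he
      by_cases hb : ch = '\\' <;> by_cases hpipe : ch = '|' <;>
        simp [pvSplitLoop, hb, hpipe] <;> exact ih _ _ _

theorem pvLmain (s : List Char) : ∀ parts cur escape,
    (pvSplitLoop s parts cur escape).all pvIsAlignCell
      = (parts.all pvIsAlignCell && pvTailRun s cur escape) := by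
  induction s with
  | nil => intro parts cur escape; simp [pvSplitLoop, pvTailRun]
  | cons ch rest ih =>
    intro parts cur escape
    by_cases he : escape = true
    · subst he
      rw [show pvSplitLoop (ch :: rest) parts cur true
            = pvSplitLoop rest parts (cur ++ [ch]) false from rfl, ih]
      rfl
    · simp only [Bool.not_eq_true] at he; subst he
      by_cases hb : ch = '\\'
      · rw [show pvSplitLoop (ch :: rest) parts cur false
              = pvSplitLoop rest parts cur true by simp [pvSplitLoop, hb], ih]
        simp [pvTailRun, hb]
      · by_cases hpipe : ch = '|'
        · rw [show pvSplitLoop (ch :: rest) parts cur false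
                = pvSplitLoop rest (parts ++ [cur]) [] false by simp [pvSplitLoop, hpipe], ih]
          simp [pvTailRun, hpipe]
          by_cases hc : pvIsAlignCell cur = true <;> simp [hc]
        · rw [show pvSplitLoop (ch :: rest) parts cur false
                = pvSplitLoop rest parts (cur ++ [ch]) false by simp [pvSplitLoop, hb, hpipe], ih]
          simp [pvTailRun, hb, hpipe]

-- ===== VERDICT (by name: the statement is the Claim_ definition above) =====
theorem pvCore (s : List Char) :
    (if (pvSplitLoop s [] [] false).isEmpty then false
     else (pvSplitLoop s [] [] false).all pvIsAlignCell) = pvAltLoop s 0 false := by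
  have hne := pvSplitLoopNeNil s [] [] false
  simp only [List.isEmpty_iff]
  rw [if_neg hne, pvLmain s [] [] false, pvL2 s [] false]
  simp [pvStOf]

theorem is_alignment_row_spec : Claim_equal_is_alignment_row := by
  unfold Claim_equal_is_alignment_row
  intro line _
  unfold Spec_is_alignment_row is_alignment_row is_alignment_row_alt pvSplitRow
  exact (pvCore _).symm ▸ rfl
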